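-- pv_equiv track=rewrite | github.com/asolomon4146/Motif-Mark | motif-mark-oop.py | get_intervals
-- ===== SOURCE A (Python) =====
-- def get_intervals(seq):
--     """returns list of (start, end, region) for a seq
--     region is 'exon' if letter is uppercase, 'intron' if lowercase
--     """
--     intervals = []
--     if not seq:
--         return intervals
--     current = 'exon' if seq[0].isupper() else 'intron'
--     start = 0
--     for i, ch in enumerate(seq):
--         region = 'exon' if ch.isupper() else 'intron'
--         if region != current:
--             intervals.append((start, i, current))
--             start = i
--             current = region
--     intervals.append((start, len(seq), current))
--     return intervals
-- ===== SOURCE B (Python) =====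
-- def get_intervals(seq):
--     """returns list of (start, end, region) for a seq
--     region is 'exon' if letter is uppercase, 'intron' if lowercase
--     """
--     intervals = []
--     i = 0
--     n = len(seq)
--     while i < n:
--         key = seq[i].isupper()
--         j = i + 1
--         while j < n and seq[j].isupper() == key:
--             j += 1
--         intervals.append((i, j, 'exon' if key else 'intron'))
--         i = j
--     return intervals
-- ===== Notes on version B (the rewrite author's own statement) =====
-- stated objective: alternative
-- what changed: Replaces A's single enumerate pass with a state machine (current region, pending start, final flush) by an outer loop that scans each maximal same-case run with an inner scan and emits the interval directly from the run bounds.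
import Mathlib
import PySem

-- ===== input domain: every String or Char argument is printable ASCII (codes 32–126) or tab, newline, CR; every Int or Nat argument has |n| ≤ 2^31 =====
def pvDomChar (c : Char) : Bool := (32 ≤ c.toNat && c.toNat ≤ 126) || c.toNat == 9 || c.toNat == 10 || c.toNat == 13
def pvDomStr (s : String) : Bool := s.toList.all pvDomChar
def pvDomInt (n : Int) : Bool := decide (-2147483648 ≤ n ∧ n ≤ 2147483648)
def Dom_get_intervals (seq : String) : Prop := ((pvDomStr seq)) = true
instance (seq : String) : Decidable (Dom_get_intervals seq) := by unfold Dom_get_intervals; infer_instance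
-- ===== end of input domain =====

-- B replaces A's state-machine pass (current region + pending start + final flush) by an
-- outer loop over maximal same-case runs with an inner scan; same O(n) cost, return values equal.


-- ===== PORT A =====
-- loop body: region := 'exon' if ch.isupper() else 'intron'; if region != current: append, reset
def stepA (s : List (Int × Int × String) × Int × String) (p : Int × Char) :
    List (Int × Int × String) × Int × String :=
  let region := if PySem.Chars.isupper p.2 then "exon" else "intron"
  if region ≠ s.2.2 then (s.1 ++ [(s.2.1, p.1, s.2.2)], p.1, region) else s

def get_intervals (seq : String) : List (Int × Int × String) :=
  match seq.toList with
  | [] => []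
  | c0 :: rest =>
    let current := if PySem.Chars.isupper c0 then "exon" else "intron"
    let st := (PySem.List.enumerate (c0 :: rest) 0).foldl stepA ([], 0, current)
    st.1 ++ [(st.2.1, ((c0 :: rest).length : Int), st.2.2)]

-- ===== PORT B =====
-- outer while loop of Source B: each iteration scans one maximal run of equal .isupper() and emits it
def altGroups : List Char → Int → List (Int × Int × String)
  | [], _ => []
  | c :: rest, off =>
    let key := PySem.Chars.isupper c
    let runLen : Int := 1 + (rest.takeWhile (fun x => PySem.Chars.isupper x == key)).length
    (off, off + runLen, if key then "exon" else "intron") ::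
      altGroups (rest.dropWhile (fun x => PySem.Chars.isupper x == key)) (off + runLen)
  termination_by cs _ => cs.length
  decreasing_by
    exact Nat.lt_succ_of_le (List.length_dropWhile_le _ _)

def get_intervals_alt (seq : String) : List (Int × Int × String) :=
  altGroups seq.toList 0

-- ===== PRECONDITION & SPEC =====
def Spec_get_intervals (seq : String) (out : List (Int × Int × String)) : Prop := out = get_intervals_alt seq
instance (seq : String) (out : List (Int × Int × String)) : Decidable (Spec_get_intervals seq out) := by unfold Spec_get_intervals; infer_instance

-- ===== CLAIM (what is proved, stated in full; the proofs are below) =====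
def Claim_equal_get_intervals : Prop := ∀ (seq : String), Dom_get_intervals seq → Spec_get_intervals seq (get_intervals seq)

-- ===== LEMMAS AND PROOFS =====

-- A's foldl only ever appends to the accumulator: factor the accumulator out.
theorem foldl_stepA_acc (l : List (Int × Char)) :
    ∀ (acc : List (Int × Int × String)) (start : Int) (cur : String),
      l.foldl stepA (acc, start, cur) =
        (acc ++ (l.foldl stepA ([], start, cur)).1, (l.foldl stepA ([], start, cur)).2) := by
  induction l with
  | nil => intro acc start cur; simp
  | cons p l ih =>
    intro acc start cur
    simp only [List.foldl_cons, stepA]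
    by_cases h : (if PySem.Chars.isupper p.2 then "exon" else "intron") ≠ cur
    · simp only [if_pos h, List.nil_append]
      rw [ih (acc ++ [(start, p.1, cur)]), ih [(start, p.1, cur)]]
      simp
    · simp only [if_neg h]
      exact ih acc start cur

-- Loop invariant: running A's loop from state (start, cur) on the remaining chars
-- (enumerated from n) and then flushing equals the pending interval followed by the B-groups
-- of the suffix past the current run.
theorem loopA (cs : List Char) :
    ∀ (n start : Int) (key : Bool),
      (((PySem.List.enumerate cs n).foldl stepA
          ([], start, if key then "exon" else "intron")).1 ++
        [(((PySem.List.enumerate cs n).foldl stepA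
            ([], start, if key then "exon" else "intron")).2.1, n + (cs.length : Int),
          ((PySem.List.enumerate cs n).foldl stepA
            ([], start, if key then "exon" else "intron")).2.2)]) =
      (start, n + ((cs.takeWhile (fun x => PySem.Chars.isupper x == key)).length : Int),
        if key then "exon" else "intron") ::
        altGroups (cs.dropWhile (fun x => PySem.Chars.isupper x == key))
          (n + ((cs.takeWhile (fun x => PySem.Chars.isupper x == key)).length : Int)) := by
  induction cs with
  | nil =>
    intro n start key
    simp [PySem.List.enumerate_nil, altGroups]
  | cons c rest ih =>
    intro n start key
    rw [PySem.List.enumerate_cons]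
    simp only [List.foldl_cons]
    by_cases hk : PySem.Chars.isupper c = key
    · -- same region: state unchanged, run continues
      have hreg : (if PySem.Chars.isupper c then "exon" else "intron") =
          (if key then "exon" else "intron") := by rw [hk]
      have hstep : stepA ([], start, if key then "exon" else "intron") (n, c) =
          ([], start, if key then "exon" else "intron") := by
        simp [stepA, hreg]
      rw [hstep]
      have h2 := ih (n + 1) start key
      simp only [List.takeWhile_cons, List.dropWhile_cons, hk, beq_self_eq_true, if_pos,
        List.length_cons]
      have e1 : n + ((rest.length : Int) + 1) = (n + 1) + (rest.length : Int) := by ring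
      have e2 : n + (((rest.takeWhile (fun x => PySem.Chars.isupper x == key)).length : Int) + 1)
          = (n + 1) + ((rest.takeWhile (fun x => PySem.Chars.isupper x == key)).length : Int) := by
        ring
      push_cast
      rw [e1, e2]
      exact h2
    · -- region changes: flush pending interval, start a new run at n
      have hreg : (if PySem.Chars.isupper c then "exon" else "intron") ≠
          (if key then "exon" else "intron") := by
        cases hc : PySem.Chars.isupper c <;> cases hkk : key <;> simp_all
      have hstep : stepA ([], start, if key then "exon" else "intron") (n, c) =
          ([(start, n, if key then "exon" else "intron")], n,
            if PySem.Chars.isupper c then "exon" else "intron") := by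
        simp [stepA, hreg]
      have hkf : (PySem.Chars.isupper c == key) = false := by
        simp [hk]
      have h2 := ih (n + 1) n (PySem.Chars.isupper c)
      rw [hstep, foldl_stepA_acc]
      simp only [List.takeWhile_cons, List.dropWhile_cons, hkf, Bool.false_eq_true, if_false,
        List.length_nil, Int.natCast_zero, add_zero, List.length_cons, List.cons_append,
        List.nil_append]
      have e1 : n + ((rest.length : Int) + 1) = (n + 1) + (rest.length : Int) := by ring
      push_cast
      rw [e1]
      cases hc : PySem.Chars.isupper c with
      | false =>
        rw [hc] at h2
        rw [h2, altGroups]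
        simp only [hc]
        congr 1
        have e3 : n + (1 + ((List.takeWhile (fun x => PySem.Chars.isupper x == false) rest).length : Int))
            = n + 1 + ((List.takeWhile (fun x => PySem.Chars.isupper x == false) rest).length : Int) := by
          ring
        rw [e3]
      | true =>
        rw [hc] at h2
        rw [h2, altGroups]
        simp only [hc]
        congr 1
        have e3 : n + (1 + ((List.takeWhile (fun x => PySem.Chars.isupper x == true) rest).length : Int))
            = n + 1 + ((List.takeWhile (fun x => PySem.Chars.isupper x == true) rest).length : Int) := by
          ring
        rw [e3]


-- ===== VERDICT (by name: the statement is the Claim_ definition above) =====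
theorem get_intervals_spec : Claim_equal_get_intervals := by
  intro seq _
  unfold Spec_get_intervals get_intervals get_intervals_alt
  cases h : seq.toList with
  | nil => simp [altGroups]
  | cons c0 rest =>
    simp only []
    have := loopA (c0 :: rest) 0 0 (PySem.Chars.isupper c0)
    simp only [zero_add] at this
    rw [this]
    rw [altGroups]
    simp only [List.takeWhile_cons, List.dropWhile_cons, beq_self_eq_true, if_pos,
      List.length_cons, zero_add]
    congr 2 <;> push_cast <;> ring_nf
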